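-- pv_equiv track=rewrite | github.com/Pratiksha-Khetre/rift26-hackathon | ML/phenotype_mapper.py | _handle_hla_b
-- ===== SOURCE A (Python) =====
-- HLA_B_5701_RSIDS = {"rs2395029", "rs9264942"}
--
-- HLA_B_1502_RSIDS = {"rs3909184", "rs2844682"}
--
-- def _handle_hla_b(variants: list[dict]) -> tuple[str, str]:
--     """
--     Determine HLA-B phenotype from detected variants.
--     Returns (diplotype, phenotype) where phenotype is "Positive" or "Negative".
--
--     Checks for HLA-B*57:01 (abacavir) and HLA-B*15:02 (carbamazepine) tag SNPs.
--     Only heterozygous or homozygous_alt variants count — 0/0 are skipped by parser.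
--     """
--     rsids_present = {
--         v.get("rsid")
--         for v in variants
--         if v.get("zygosity") in ("heterozygous", "homozygous_alt") and v.get("rsid")
--     }
--
--     if rsids_present & HLA_B_5701_RSIDS:
--         return "*57:01 Positive", "Positive"
--
--     if rsids_present & HLA_B_1502_RSIDS:
--         return "*15:02 Positive", "Positive"
--
--     return "Wildtype", "Negative"
-- ===== SOURCE B (Python) =====
-- _HLA_B_PRIORITY = {"rs2395029": 2, "rs9264942": 2, "rs3909184": 1, "rs2844682": 1}
--
-- _HLA_B_RESULTS = [
--     ("Wildtype", "Negative"),
--     ("*15:02 Positive", "Positive"),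
--     ("*57:01 Positive", "Positive"),
-- ]
--
-- def _handle_hla_b(variants: list[dict]) -> tuple[str, str]:
--     """Single pass: fold a numeric priority (57:01 = 2 > 15:02 = 1) with max,
--     then index a result table. No set is built and the list is scanned once."""
--     best = 0
--     for v in variants:
--         if v.get("zygosity") in ("heterozygous", "homozygous_alt") and v.get("rsid"):
--             best = max(best, _HLA_B_PRIORITY.get(v.get("rsid"), 0))
--     return _HLA_B_RESULTS[best]
-- ===== Notes on version B (the rewrite author's own statement) =====
-- stated objective: alternative
-- what changed: Replaces build-a-set-of-rsids-then-intersect-with-two-constant-sets by a single pass that folds a numeric priority (57:01=2, 15:02=1) with max over the variants and indexes a result table with the final priority.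
import Mathlib
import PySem

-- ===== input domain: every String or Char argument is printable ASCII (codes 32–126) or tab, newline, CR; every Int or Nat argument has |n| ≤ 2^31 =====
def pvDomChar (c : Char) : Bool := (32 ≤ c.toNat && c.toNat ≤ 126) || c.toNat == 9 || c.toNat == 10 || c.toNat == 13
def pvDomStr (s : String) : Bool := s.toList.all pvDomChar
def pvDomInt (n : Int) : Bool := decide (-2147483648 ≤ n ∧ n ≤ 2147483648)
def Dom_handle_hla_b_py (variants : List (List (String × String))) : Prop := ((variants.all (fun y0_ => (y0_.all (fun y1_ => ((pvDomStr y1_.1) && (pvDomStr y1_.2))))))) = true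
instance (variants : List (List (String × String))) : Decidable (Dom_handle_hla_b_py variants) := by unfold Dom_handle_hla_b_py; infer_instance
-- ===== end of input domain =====

-- B replaces A's "collect qualifying rsids into a set, intersect with two constant sets" by a
-- single pass folding a numeric priority (57:01 = 2 > 15:02 = 1) with max, then indexing a
-- result table; objective: alternative (same cost, no intermediate set, one scan).

-- ===== PORT A =====
def pvHlab5701A : PySem.Set String := PySem.Set.ofList ["rs2395029", "rs9264942"]
def pvHlab1502A : PySem.Set String := PySem.Set.ofList ["rs3909184", "rs2844682"]

-- v.get("zygosity") in ("heterozygous", "homozygous_alt") and v.get("rsid")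
def pvGuardA (v : List (String × String)) : Bool :=
  (let z := PySem.Dict.get? (PySem.Dict.mk v) "zygosity"
   z == some "heterozygous" || z == some "homozygous_alt") &&
  (match PySem.Dict.get? (PySem.Dict.mk v) "rsid" with
   | some s => !(s == "")
   | none => false)

def pvRsidA (v : List (String × String)) : String :=
  (PySem.Dict.get? (PySem.Dict.mk v) "rsid").getD ""

def handle_hla_b_py (variants : List (List (String × String))) : String × String :=
  let rsids_present : PySem.Set String :=
    PySem.Set.ofList ((variants.filter pvGuardA).map pvRsidA)
  if !(PySem.Set.inter rsids_present pvHlab5701A).isEmpty then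
    ("*57:01 Positive", "Positive")
  else if !(PySem.Set.inter rsids_present pvHlab1502A).isEmpty then
    ("*15:02 Positive", "Positive")
  else
    ("Wildtype", "Negative")

-- ===== PORT B =====
def pvPrioB : PySem.Dict String Int :=
  PySem.Dict.mk [("rs2395029", 2), ("rs9264942", 2), ("rs3909184", 1), ("rs2844682", 1)]

def pvResultsB : List (String × String) :=
  [("Wildtype", "Negative"), ("*15:02 Positive", "Positive"), ("*57:01 Positive", "Positive")]

def pvGuardB (v : List (String × String)) : Bool :=
  (let z := PySem.Dict.get? (PySem.Dict.mk v) "zygosity"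
   z == some "heterozygous" || z == some "homozygous_alt") &&
  (match PySem.Dict.get? (PySem.Dict.mk v) "rsid" with
   | some s => !(s == "")
   | none => false)

def pvRsidB (v : List (String × String)) : String :=
  (PySem.Dict.get? (PySem.Dict.mk v) "rsid").getD ""

-- best = 0; for v in variants: if <guard>: best = max(best, PRIORITY.get(rsid, 0))
def pvBestB (variants : List (List (String × String))) : Int :=
  variants.foldl
    (fun best v => if pvGuardB v then max best (PySem.Dict.getD pvPrioB (pvRsidB v) 0) else best) 0

def handle_hla_b_py_alt (variants : List (List (String × String))) : String × String :=
  -- _HLA_B_RESULTS[best]; best is always 0, 1 or 2, so the index is in range and getD's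
  -- default is never taken (pyGet? = none would be Python's IndexError, unreachable here)
  (PySem.List.pyGet? pvResultsB (pvBestB variants)).getD ("", "")

-- ===== PRECONDITION & SPEC =====
def Spec_handle_hla_b_py (variants : List (List (String × String))) (out : String × String) : Prop := out = handle_hla_b_py_alt variants
instance (variants : List (List (String × String))) (out : String × String) : Decidable (Spec_handle_hla_b_py variants out) := by unfold Spec_handle_hla_b_py; infer_instance

-- ===== CLAIM (what is proved, stated in full; the proofs are below) =====
def Claim_equal_handle_hla_b_py : Prop := ∀ (variants : List (List (String × String))), Dom_handle_hla_b_py variants → Spec_handle_hla_b_py variants (handle_hla_b_py variants)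

-- ===== LEMMAS AND PROOFS =====

-- proof helper: "some qualifying variant's rsid belongs to C" (one scan)
def pvHits (variants : List (List (String × String))) (C : PySem.Set String) : Bool :=
  variants.any (fun v => pvGuardA v && PySem.Set.contains C (pvRsidA v))

-- A's "intersection with C is nonempty" equals the one-scan condition.
theorem pvCond_eq (variants : List (List (String × String))) (C : PySem.Set String) :
    (!(PySem.Set.inter
        (PySem.Set.ofList ((variants.filter pvGuardA).map pvRsidA)) C).isEmpty)
      = pvHits variants C := by
  rw [Bool.eq_iff_iff]
  simp only [Bool.not_eq_true', List.isEmpty_eq_false_iff_exists_mem,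
    PySem.Set.mem_inter, PySem.Set.mem_ofList, List.mem_map, List.mem_filter,
    pvHits, List.any_eq_true]
  constructor
  · rintro ⟨x, ⟨v, ⟨hv, hg⟩, rfl⟩, hx⟩
    exact ⟨v, hv, by simp [hg, hx]⟩
  · rintro ⟨v, hv, h⟩
    simp only [Bool.and_eq_true, PySem.Set.contains_iff] at h
    exact ⟨pvRsidA v, ⟨v, ⟨hv, h.1⟩, rfl⟩, h.2⟩

def pvStepB (best : Int) (v : List (String × String)) : Int :=
  if pvGuardB v then max best (PySem.Dict.getD pvPrioB (pvRsidB v) 0) else best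

theorem pvStep_nonneg {b : Int} (v : List (String × String)) (hb : 0 ≤ b) :
    0 ≤ pvStepB b v := by
  unfold pvStepB; split <;> [exact le_max_of_le_left hb; exact hb]

theorem pvFold_nonneg (l : List (List (String × String))) :
    ∀ b : Int, 0 ≤ b → 0 ≤ l.foldl pvStepB b := by
  induction l with
  | nil => intro b hb; exact hb
  | cons v l ih => intro b hb; exact ih _ (pvStep_nonneg v hb)

theorem pvFold_max (l : List (List (String × String))) :
    ∀ b : Int, 0 ≤ b → l.foldl pvStepB b = max b (l.foldl pvStepB 0) := by
  induction l with
  | nil => intro b hb; simp [max_eq_left hb]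
  | cons v l ih =>
    intro b hb
    have hF : 0 ≤ l.foldl pvStepB 0 := pvFold_nonneg l 0 le_rfl
    have h1 := ih (pvStepB b v) (pvStep_nonneg v hb)
    have h2 := ih (pvStepB 0 v) (pvStep_nonneg v le_rfl)
    simp only [List.foldl_cons, h1, h2]
    unfold pvStepB
    split <;> omega

theorem pvPrio_getD (s : String) : PySem.Dict.getD pvPrioB s 0 =
    if "rs2395029" = s then 2 else if "rs9264942" = s then 2
    else if "rs3909184" = s then 1 else if "rs2844682" = s then 1 else 0 := by
  simp only [pvPrioB, PySem.Dict.getD, PySem.Dict.get?_mk_cons, beq_iff_eq]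
  split_ifs <;> simp [PySem.Dict.get?]

theorem pvC57 (s : String) : PySem.Set.contains pvHlab5701A s
    = (s == "rs2395029" || s == "rs9264942") := by
  rw [Bool.eq_iff_iff]
  simp [pvHlab5701A, PySem.Set.mem_ofList]

theorem pvC15 (s : String) : PySem.Set.contains pvHlab1502A s
    = (s == "rs3909184" || s == "rs2844682") := by
  rw [Bool.eq_iff_iff]
  simp [pvHlab1502A, PySem.Set.mem_ofList]

-- the single-pass max computes exactly A's two staged conditions
theorem pvBest_eq (l : List (List (String × String))) :
    pvBestB l = if pvHits l pvHlab5701A then 2 else if pvHits l pvHlab1502A then 1 else 0 := by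
  induction l with
  | nil => simp [pvBestB, pvHits]
  | cons v l ih =>
    have hv : pvBestB (v :: l) = max (pvStepB 0 v) (pvBestB l) := by
      simpa [pvBestB, pvStepB] using pvFold_max l (pvStepB 0 v) (pvStep_nonneg v le_rfl)
    rw [hv, ih]
    have hr : pvRsidB v = pvRsidA v := rfl
    simp only [pvHits, List.any_cons, pvC57, pvC15]
    by_cases g : pvGuardB v
    · have hg : pvGuardA v = true := g
      unfold pvStepB
      rw [if_pos g, pvPrio_getD, hr, hg]
      simp only [Bool.true_and]
      by_cases h1 : pvRsidA v = "rs2395029"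
      · simp only [h1]; simp; split_ifs <;> omega
      · by_cases h2 : pvRsidA v = "rs9264942"
        · simp only [h2]; simp; split_ifs <;> omega
        · by_cases h3 : pvRsidA v = "rs3909184"
          · simp only [h3]; simp; split_ifs <;> omega
          · by_cases h4 : pvRsidA v = "rs2844682"
            · simp only [h4]; simp; split_ifs <;> omega
            · simp [h1, h2, h3, h4, Ne.symm h1, Ne.symm h2, Ne.symm h3, Ne.symm h4]
              split_ifs <;> omega
    · have hg : pvGuardA v = false := by simpa using g
      unfold pvStepB
      rw [if_neg g, hg]
      simp only [Bool.false_and, Bool.false_or]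
      split_ifs <;> omega

-- ===== VERDICT (by name: the statement is the Claim_ definition above) =====
theorem handle_hla_b_py_spec : Claim_equal_handle_hla_b_py := by
  intro variants _
  unfold Spec_handle_hla_b_py
  simp only [handle_hla_b_py, handle_hla_b_py_alt, pvCond_eq, pvBest_eq]
  by_cases h1 : pvHits variants pvHlab5701A <;>
    by_cases h2 : pvHits variants pvHlab1502A <;>
      simp [h1, h2, pvResultsB]
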